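-- pv_equiv track=rewrite | github.com/EnzoBozzani/compiler | utils.py | char_belongs_to_group
-- ===== SOURCE A (Python) =====
-- az_list = ['a', 'b', 'c', 'd', 'e', 'f', 'g', 'h', 'i', 'j', 'k', 'l', 'm', 'n', 'o', 'p', 'q', 'r', 's', 't', 'u', 'v', 'w', 'x', 'y', 'z']
--
-- az_upper_list = [char.upper() for char in az_list]
--
-- numbers_list = ['0', '1', '2', '3', '4', '5', '6', '7', '8', '9']
--
-- def belongs_to_az(char: str) -> bool:
--     return char in az_list
--
-- def belongs_to_az_upper(char: str) -> bool:
--     return char in az_upper_list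
--
-- def belongs_to_numbers(char: str) -> bool:
--     return char in numbers_list
--
-- def char_belongs_to_group(char: str, group: list[str]) -> bool:
--     for element in group:
--         if element == 'a-z':
--             if belongs_to_az(char):
--                 return True
--         elif element == 'A-Z':
--             if belongs_to_az_upper(char):
--                 return True
--         elif element == '0-9':
--             if belongs_to_numbers(char):
--                 return True
--         elif element == '*' or element == '+':
--             pass
--         else:
--             if char == element:
--                 return True
--
--     return False
-- ===== SOURCE B (Python) =====
-- def char_belongs_to_group(char: str, group: list[str]) -> bool:
--     accepted = set()
--     for element in group:
--         if element == 'a-z':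
--             accepted.update('abcdefghijklmnopqrstuvwxyz')
--         elif element == 'A-Z':
--             accepted.update('ABCDEFGHIJKLMNOPQRSTUVWXYZ')
--         elif element == '0-9':
--             accepted.update('0123456789')
--         elif element == '*' or element == '+':
--             pass
--         else:
--             accepted.add(element)
--     return char in accepted
-- ===== Notes on version B (the rewrite author's own statement) =====
-- stated objective: alternative
-- what changed: B replaces A's branch-per-element loop with early return by building, in one pass, a set of all accepted characters/literals and finishing with a single membership test.
import Mathlib
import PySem

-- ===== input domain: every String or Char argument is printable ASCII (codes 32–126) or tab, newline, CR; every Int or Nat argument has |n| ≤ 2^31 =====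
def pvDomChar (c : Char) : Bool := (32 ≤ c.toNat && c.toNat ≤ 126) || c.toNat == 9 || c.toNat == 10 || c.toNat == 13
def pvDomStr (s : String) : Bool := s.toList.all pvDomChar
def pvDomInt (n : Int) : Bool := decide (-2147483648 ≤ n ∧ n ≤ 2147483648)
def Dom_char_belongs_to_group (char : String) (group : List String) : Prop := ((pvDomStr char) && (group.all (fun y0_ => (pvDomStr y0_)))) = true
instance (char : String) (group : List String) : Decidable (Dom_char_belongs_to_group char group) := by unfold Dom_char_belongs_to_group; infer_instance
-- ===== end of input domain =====

-- B builds a set of accepted strings in one pass and ends with a single membership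
-- test, instead of A's per-element branch dispatch with early return (objective: alternative).

-- ===== PORT A =====
def az_list : List String :=
  ["a", "b", "c", "d", "e", "f", "g", "h", "i", "j", "k", "l", "m",
   "n", "o", "p", "q", "r", "s", "t", "u", "v", "w", "x", "y", "z"]

def az_upper_list : List String := az_list.map (fun c => PySem.Str.upper c)

def numbers_list : List String := ["0", "1", "2", "3", "4", "5", "6", "7", "8", "9"]

def belongs_to_az (char : String) : Bool := az_list.contains char

def belongs_to_az_upper (char : String) : Bool := az_upper_list.contains char

def belongs_to_numbers (char : String) : Bool := numbers_list.contains char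

def cbgLoop (char : String) : List String → Bool
  | [] => false
  | element :: rest =>
    if element = "a-z" then
      (if belongs_to_az char then true else cbgLoop char rest)
    else if element = "A-Z" then
      (if belongs_to_az_upper char then true else cbgLoop char rest)
    else if element = "0-9" then
      (if belongs_to_numbers char then true else cbgLoop char rest)
    else if element = "*" ∨ element = "+" then
      cbgLoop char rest
    else
      (if char = element then true else cbgLoop char rest)

def char_belongs_to_group (char : String) (group : List String) : Bool :=
  cbgLoop char group

-- ===== PORT B =====
-- iterating a Python set over a string adds its single-character strings
def strChars (s : String) : List String := s.toList.map (fun c => String.ofList [c])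

def cbgStep (acc : PySem.Set String) (element : String) : PySem.Set String :=
  if element = "a-z" then PySem.Set.update acc (strChars "abcdefghijklmnopqrstuvwxyz")
  else if element = "A-Z" then PySem.Set.update acc (strChars "ABCDEFGHIJKLMNOPQRSTUVWXYZ")
  else if element = "0-9" then PySem.Set.update acc (strChars "0123456789")
  else if element = "*" ∨ element = "+" then acc
  else PySem.Set.add acc element

def char_belongs_to_group_alt (char : String) (group : List String) : Bool :=
  PySem.Set.contains (group.foldl cbgStep PySem.Set.empty) char

-- ===== PRECONDITION & SPEC =====
def Spec_char_belongs_to_group (char : String) (group : List String) (out : Bool) : Prop := out = char_belongs_to_group_alt char group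
instance (char : String) (group : List String) (out : Bool) : Decidable (Spec_char_belongs_to_group char group out) := by unfold Spec_char_belongs_to_group; infer_instance

-- ===== CLAIM (what is proved, stated in full; the proofs are below) =====
def Claim_equal_char_belongs_to_group : Prop := ∀ (char : String) (group : List String), Dom_char_belongs_to_group char group → Spec_char_belongs_to_group char group (char_belongs_to_group char group)

-- ===== LEMMAS AND PROOFS =====

theorem strChars_low : strChars "abcdefghijklmnopqrstuvwxyz" = az_list := by decide

theorem strChars_up : strChars "ABCDEFGHIJKLMNOPQRSTUVWXYZ" = az_upper_list := by decide

theorem strChars_dig : strChars "0123456789" = numbers_list := by decide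

theorem contains_step (s : PySem.Set String) (e char : String) :
    PySem.Set.contains (cbgStep s e) char =
      (PySem.Set.contains s char || cbgLoop char [e]) := by
  simp only [cbgStep, cbgLoop]
  split_ifs <;>
    simp_all [strChars_low, strChars_up, strChars_dig,
      belongs_to_az, belongs_to_az_upper, belongs_to_numbers, eq_comm]

theorem cbgLoop_cons (char e : String) (rest : List String) :
    cbgLoop char (e :: rest) = (cbgLoop char [e] || cbgLoop char rest) := by
  simp only [cbgLoop]
  split_ifs <;> simp

theorem contains_foldl (group : List String) (s : PySem.Set String) (char : String) :
    PySem.Set.contains (group.foldl cbgStep s) char =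
      (PySem.Set.contains s char || cbgLoop char group) := by
  induction group generalizing s with
  | nil => simp [cbgLoop]
  | cons e rest ih =>
      rw [List.foldl_cons, ih, contains_step, cbgLoop_cons char e rest, Bool.or_assoc]

-- ===== VERDICT (by name: the statement is the Claim_ definition above) =====
theorem char_belongs_to_group_spec : Claim_equal_char_belongs_to_group := by
  intro char group _
  show cbgLoop char group = PySem.Set.contains (group.foldl cbgStep PySem.Set.empty) char
  rw [contains_foldl]
  simp [PySem.Set.empty, PySem.Set.contains]
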